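-- pv_equiv track=rewrite | github.com/Huang-Yidian/NER-FlatLattice | utils.py | get_bigram_in_sentence
-- ===== SOURCE A (Python) =====
-- def get_bigram_in_sentence(sentence:list):
--     bigram_list = []
--     for i in range(len(sentence)):
--         bigram = []
--         for j in range(len(sentence[i])):
--             if j == 0:
--                 bigram.append("</s>" + sentence[i][j])
--             else:
--                 bigram.append(sentence[i][j-1] + sentence[i][j])
--         bigram_list.append(bigram)
--     return bigram_list
-- ===== SOURCE B (Python) =====
-- def _bigrams(prev, s):
--     # divide and conquer: bigrams of s seeded with prev = bigrams of the left
--     # half seeded with prev, then bigrams of the right half seeded with the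
--     # token just before the split point
--     n = len(s)
--     if n == 0:
--         return []
--     if n == 1:
--         return [prev + s[0]]
--     mid = n // 2
--     return _bigrams(prev, s[:mid]) + _bigrams(s[mid - 1], s[mid:])
--
-- def get_bigram_in_sentence(sentence: list):
--     return [_bigrams("</s>", s) for s in sentence]
-- ===== Notes on version B (the rewrite author's own statement) =====
-- stated objective: alternative
-- what changed: Replaces A's left-to-right indexed scan with a j==0 guard by a divide-and-conquer recursion: each sentence is split at the midpoint and the two halves are solved independently, the right half seeded with the token just before the split (correct because each bigram depends only on its immediate predecessor).
import Mathlib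
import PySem

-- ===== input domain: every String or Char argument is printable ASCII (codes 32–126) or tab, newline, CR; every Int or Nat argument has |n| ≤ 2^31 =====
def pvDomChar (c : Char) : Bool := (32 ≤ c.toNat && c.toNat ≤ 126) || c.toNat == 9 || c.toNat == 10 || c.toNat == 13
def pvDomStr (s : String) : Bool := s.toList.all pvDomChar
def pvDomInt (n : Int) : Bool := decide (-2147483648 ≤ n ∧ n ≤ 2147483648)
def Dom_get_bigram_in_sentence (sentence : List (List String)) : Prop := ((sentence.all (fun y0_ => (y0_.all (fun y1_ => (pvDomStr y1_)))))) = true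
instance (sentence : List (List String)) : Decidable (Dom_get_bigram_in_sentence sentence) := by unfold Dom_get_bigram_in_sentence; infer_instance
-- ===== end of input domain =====

-- B replaces A's indexed left-to-right scan by a divide-and-conquer recursion on each sentence (alternative; same cost).

-- ===== PORT A =====
-- inner loop: for j in range(len(s)): … (j == 0 guard, index j-1 access)
def pvBigramA (s : List String) : List String :=
  (PySem.List.pyRange 0 s.length 1).foldl
    (fun bigram j =>
      if j == 0 then bigram ++ ["</s>" ++ PySem.List.pyGetD s j ""]
      else bigram ++ [PySem.List.pyGetD s (j - 1) "" ++ PySem.List.pyGetD s j ""]) []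

def get_bigram_in_sentence (sentence : List (List String)) : List (List String) :=
  (PySem.List.pyRange 0 sentence.length 1).foldl
    (fun bigram_list i => bigram_list ++ [pvBigramA (PySem.List.pyGetD sentence i [])]) []

-- ===== PORT B =====
-- _bigrams(prev, s): divide and conquer.  s[:mid] / s[mid:] with 0 ≤ mid ≤ len are exactly
-- take/drop; s[0] and s[mid-1] are in range, so headD/getD are exact here.
def pvBigramsDC (prev : String) (s : List String) : List String :=
  if _h0 : s.length = 0 then []
  else if _h1 : s.length = 1 then [prev ++ s.headD ""]
  else
    pvBigramsDC prev (s.take (s.length / 2)) ++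
      pvBigramsDC (s.getD (s.length / 2 - 1) "") (s.drop (s.length / 2))
termination_by s.length
decreasing_by
  · simp [List.length_take]; omega
  · simp [List.length_drop]; omega

def get_bigram_in_sentence_alt (sentence : List (List String)) : List (List String) :=
  sentence.map (fun s => pvBigramsDC "</s>" s)

-- ===== PRECONDITION & SPEC =====
def Spec_get_bigram_in_sentence (sentence : List (List String)) (out : List (List String)) : Prop := out = get_bigram_in_sentence_alt sentence
instance (sentence : List (List String)) (out : List (List String)) : Decidable (Spec_get_bigram_in_sentence sentence out) := by unfold Spec_get_bigram_in_sentence; infer_instance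

-- ===== CLAIM (what is proved, stated in full; the proofs are below) =====
def Claim_equal_get_bigram_in_sentence : Prop := ∀ (sentence : List (List String)), Dom_get_bigram_in_sentence sentence → Spec_get_bigram_in_sentence sentence (get_bigram_in_sentence sentence)

-- ===== LEMMAS AND PROOFS =====

-- proof-only reference function: left-to-right recursion carrying the previous token
def pvBF (prev : String) : List String → List String
  | [] => []
  | c :: r => (prev ++ c) :: pvBF c r

lemma pvBF_append (t u : List String) (prev : String) :
    pvBF prev (t ++ u) = pvBF prev t ++ pvBF (t.getLastD prev) u := by
  induction t generalizing prev with
  | nil => rfl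
  | cons c r ih =>
    rw [List.cons_append, show pvBF prev (c :: (r ++ u)) = (prev ++ c) :: pvBF c (r ++ u) from rfl,
      ih c, List.getLastD_cons]
    rfl

lemma pvBF_eq_zip (s : List String) (prev : String) :
    pvBF prev s = (List.zip (prev :: s.dropLast) s).map (fun p => p.1 ++ p.2) := by
  induction s generalizing prev with
  | nil => rfl
  | cons c r ih =>
    cases r with
    | nil => rfl
    | cons d r' =>
      rw [show pvBF prev (c :: d :: r') = (prev ++ c) :: pvBF c (d :: r') from rfl, ih c]
      simp [List.dropLast_cons₂]

lemma pvBigramsDC_eq (n : Nat) (s : List String) (hs : s.length ≤ n) (prev : String) :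
    pvBigramsDC prev s = pvBF prev s := by
  induction n generalizing s prev with
  | zero =>
    have : s = [] := List.eq_nil_of_length_eq_zero (by omega)
    subst this; rw [pvBigramsDC]; rfl
  | succ n ih =>
    unfold pvBigramsDC
    split
    · next h0 =>
      have : s = [] := List.eq_nil_of_length_eq_zero h0
      subst this; rfl
    · split
      · next h0 h1 =>
        rcases s with _ | ⟨a, _ | ⟨b, r⟩⟩ <;> simp_all [pvBF]
      · next h0 h1 =>
        have h2 : 2 ≤ s.length := by omega
        have hmid1 : 1 ≤ s.length / 2 := by omega
        have hmidlt : s.length / 2 < s.length := by omega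
        rw [ih _ (by simp [List.length_take]; omega) prev,
            ih _ (by simp [List.length_drop]; omega) _]
        have hsplit := (List.take_append_drop (s.length / 2) s).symm
        conv_rhs => rw [hsplit]
        rw [pvBF_append]
        congr 1
        congr 1
        -- (s.take mid).getLastD prev = s.getD (mid - 1) ""
        have hlen : (s.take (s.length / 2)).length = s.length / 2 := by
          simp [List.length_take]; omega
        have hlt : s.length / 2 - 1 < s.length := by omega
        rw [List.getLastD_eq_getLast?, List.getLast?_eq_getElem?, hlen,
            List.getElem?_take, List.getD_eq_getElem?_getD]
        have hcond : s.length / 2 - 1 < s.length / 2 := by omega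
        rw [if_pos hcond, List.getElem?_eq_getElem hlt]
        rfl

-- A's inner loop equals the zip of the padded predecessor sequence with s.
lemma pvBigramA_eq (s : List String) :
    pvBigramA s = (List.zip ("</s>" :: s.dropLast) s).map (fun p => p.1 ++ p.2) := by
  unfold pvBigramA
  have hbody : (fun (bigram : List String) (j : Int) =>
      if j == 0 then bigram ++ ["</s>" ++ PySem.List.pyGetD s j ""]
      else bigram ++ [PySem.List.pyGetD s (j - 1) "" ++ PySem.List.pyGetD s j ""]) =
      (fun bigram j => bigram ++ [if j == 0 then "</s>" ++ PySem.List.pyGetD s j ""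
        else PySem.List.pyGetD s (j - 1) "" ++ PySem.List.pyGetD s j ""]) := by
    funext bigram j; split <;> rfl
  rw [hbody, PySem.List.foldl_append_singleton_eq_map, PySem.List.pyRange_zero_nat,
    List.map_map]
  apply List.ext_getElem
  · simp [List.length_zip]
    omega
  · intro k h1 h2
    have hk : k < s.length := by simpa using h1
    simp only [List.nil_append, List.getElem_map, Function.comp_apply, List.getElem_range,
      List.getElem_zip]
    rcases Nat.eq_zero_or_pos k with hk0 | hkpos
    · subst hk0
      rw [show ((0:Nat):Int) = (0:Int) from rfl]
      rw [show ((0:Int) == 0) = true from rfl, if_pos rfl]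
      rw [show (0:Int) = ((0:Nat):Int) from rfl, PySem.List.pyGetD_natCast]
      simp [hk]
    · have hne : (((k : Nat) : Int) == 0) = false := by simp; omega
      simp only [hne]
      have h1' : ((k : Int) - 1) = ((k - 1 : Nat) : Int) := by omega
      rw [h1', PySem.List.pyGetD_natCast, PySem.List.pyGetD_natCast]
      have hd : ("</s>" :: s.dropLast)[k]'(by simp; omega) = s[k - 1]'(by omega) := by
        rcases k with _ | k'
        · omega
        · simp [List.getElem_dropLast]
      rw [hd]
      simp [hk, Nat.lt_of_le_of_lt (Nat.sub_le k 1) hk]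

theorem get_bigram_in_sentence_spec : Claim_equal_get_bigram_in_sentence := by
  intro sentence _
  unfold Spec_get_bigram_in_sentence get_bigram_in_sentence get_bigram_in_sentence_alt
  rw [PySem.List.foldl_append_singleton_eq_map]
  have : ((PySem.List.pyRange 0 sentence.length 1).map
      (fun i => pvBigramA (PySem.List.pyGetD sentence i []))) =
      ((PySem.List.pyRange 0 sentence.length 1).map
      (fun i => PySem.List.pyGetD sentence i [])).map pvBigramA := by
    simp [List.map_map, Function.comp]
  rw [List.nil_append, this, PySem.List.map_pyGetD_pyRange_zero', List.map_congr_left]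
  intro s _
  rw [pvBigramA_eq, pvBigramsDC_eq s.length s le_rfl, pvBF_eq_zip]
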